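-- pv_equiv track=rewrite | github.com/nzooherd/leetcode | Algorithms/黑板异或游戏.py | xorGame
-- ===== SOURCE A (Python) =====
-- from typing import List
--
-- def xorGame(nums: List[int]) -> bool:
--     import collections
--     num2fre = collections.defaultdict(int)
--     for num in nums:
--         num2fre[num] += 1
--
--     sum_num = 0
--     or_reuslt = 0
--     for key, value in num2fre.items():
--         sum_num += value % 2
--         if value % 2 == 1:
--             or_reuslt ^= key
--
--     return sum_num % 2 == 0 or (or_reuslt == 0)
-- ===== SOURCE B (Python) =====
-- from functools import reduce
-- from operator import xor
-- from typing import List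
--
-- def xorGame(nums: List[int]) -> bool:
--     return len(nums) % 2 == 0 or reduce(xor, nums, 0) == 0
-- ===== Notes on version B (the rewrite author's own statement) =====
-- stated objective: simpler
-- what changed: Replaced the frequency dictionary and the second parity/XOR loop over its items by a single pass: XOR of all elements (duplicates cancel, equalling A's or_reuslt) plus a len(nums) parity check (equalling A's sum_num parity).
import Mathlib
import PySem

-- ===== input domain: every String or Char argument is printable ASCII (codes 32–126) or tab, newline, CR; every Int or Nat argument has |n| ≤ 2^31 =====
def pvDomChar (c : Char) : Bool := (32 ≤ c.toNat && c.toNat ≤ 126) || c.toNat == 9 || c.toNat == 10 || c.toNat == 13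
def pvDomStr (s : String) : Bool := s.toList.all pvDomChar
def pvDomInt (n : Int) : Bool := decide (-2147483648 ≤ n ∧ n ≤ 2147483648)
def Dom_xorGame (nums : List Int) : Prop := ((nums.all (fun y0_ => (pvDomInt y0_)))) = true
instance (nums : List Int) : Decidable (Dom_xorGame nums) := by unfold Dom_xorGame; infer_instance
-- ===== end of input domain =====

-- B drops A's frequency dictionary and its second parity/XOR loop: one XOR fold over the list plus a length-parity check (same O(n) cost, simpler).

-- ===== PORT A =====
def xorGame (nums : List Int) : Bool :=
  -- num2fre = defaultdict(int); for num in nums: num2fre[num] += 1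
  let num2fre : PySem.Dict Int Int :=
    nums.foldl (fun d num => d.modify num 0 (· + 1)) PySem.Dict.empty
  -- sum_num = 0; or_reuslt = 0; for key, value in num2fre.items(): …
  let r : Int × Int :=
    num2fre.items.foldl
      (fun (p : Int × Int) kv =>
        (p.1 + PySem.Int.mod kv.2 2,
         if PySem.Int.mod kv.2 2 = 1 then PySem.Int.bxor p.2 kv.1 else p.2))
      (0, 0)
  decide (PySem.Int.mod r.1 2 = 0) || decide (r.2 = 0)

-- ===== PORT B =====
def xorGame_alt (nums : List Int) : Bool :=
  decide (PySem.Int.mod (nums.length : Int) 2 = 0) ||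
    decide (nums.foldl PySem.Int.bxor 0 = 0)

-- ===== PRECONDITION & SPEC =====
def Spec_xorGame (nums : List Int) (out : Bool) : Prop := out = xorGame_alt nums
instance (nums : List Int) (out : Bool) : Decidable (Spec_xorGame nums out) := by unfold Spec_xorGame; infer_instance

-- ===== CLAIM (what is proved, stated in full; the proofs are below) =====
def Claim_equal_xorGame : Prop := ∀ (nums : List Int), Dom_xorGame nums → Spec_xorGame nums (xorGame nums)

-- ===== LEMMAS AND PROOFS =====

-- the two accumulators of A's second loop, as stand-alone functions of the item list
def pvSY (l : List (Int × Int)) : Int := (l.map (fun p => PySem.Int.mod p.2 2)).sum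
def pvXO (l : List (Int × Int)) : Int :=
  l.foldl (fun o p => if PySem.Int.mod p.2 2 = 1 then PySem.Int.bxor o p.1 else o) 0

-- sign-case normal forms of Python xor, and associativity
theorem pv_bxor_np (m n : Nat) : PySem.Int.bxor (m : Int) (-(n : Int) - 1) = -((m ^^^ n : Nat) : Int) - 1 := by
  unfold PySem.Int.bxor
  have h1 : ¬ (0 : Int) ≤ -(n : Int) - 1 := by omega
  simp only [Int.natCast_nonneg, if_pos, if_neg h1]
  have h2 : (-(-(n : Int) - 1) - 1).toNat = n := by omega
  have h3 : ((m : Int)).toNat = m := by omega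
  rw [h2, h3]

theorem pv_bxor_pn (m n : Nat) : PySem.Int.bxor (-(m : Int) - 1) (n : Int) = -((m ^^^ n : Nat) : Int) - 1 := by
  unfold PySem.Int.bxor
  have h1 : ¬ (0 : Int) ≤ -(m : Int) - 1 := by omega
  simp only [Int.natCast_nonneg, if_pos, if_neg h1]
  have h2 : (-(-(m : Int) - 1) - 1).toNat = m := by omega
  have h3 : ((n : Int)).toNat = n := by omega
  rw [h2, h3]

theorem pv_bxor_pp (m n : Nat) : PySem.Int.bxor (-(m : Int) - 1) (-(n : Int) - 1) = ((m ^^^ n : Nat) : Int) := by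
  unfold PySem.Int.bxor
  have h1 : ¬ (0 : Int) ≤ -(m : Int) - 1 := by omega
  have h2 : ¬ (0 : Int) ≤ -(n : Int) - 1 := by omega
  simp only [if_neg h1, if_neg h2]
  have h3 : (-(-(m : Int) - 1) - 1).toNat = m := by omega
  have h4 : (-(-(n : Int) - 1) - 1).toNat = n := by omega
  rw [h3, h4]

theorem pv_bxor_zero_left (a : Int) : PySem.Int.bxor 0 a = a := by
  rw [PySem.Int.bxor_comm]; exact PySem.Int.bxor_zero a

theorem pv_bxor_assoc (a b c : Int) :
    PySem.Int.bxor (PySem.Int.bxor a b) c = PySem.Int.bxor a (PySem.Int.bxor b c) := by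
  have repr : ∀ z : Int, ∃ m : Nat, z = (m : Int) ∨ z = -(m : Int) - 1 := by
    intro z
    rcases z with m | m
    · exact ⟨m, Or.inl rfl⟩
    · refine ⟨m, Or.inr ?_⟩
      rw [Int.negSucc_eq]
      ring
  obtain ⟨ma, ha⟩ := repr a
  obtain ⟨mb, hb⟩ := repr b
  obtain ⟨mc, hc⟩ := repr c
  rcases ha with ha | ha <;> rcases hb with hb | hb <;> rcases hc with hc | hc <;>
    subst ha hb hc <;>
    simp only [PySem.Int.bxor_natCast, pv_bxor_np, pv_bxor_pn, pv_bxor_pp, Nat.xor_assoc]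

-- the xor accumulator splits off the initial value
theorem pvXO_acc (l : List (Int × Int)) (o : Int) :
    l.foldl (fun o p => if PySem.Int.mod p.2 2 = 1 then PySem.Int.bxor o p.1 else o) o
      = PySem.Int.bxor o (pvXO l) := by
  induction l generalizing o with
  | nil => simp only [pvXO, List.foldl_nil]; exact (PySem.Int.bxor_zero o).symm
  | cons p l ih =>
    simp only [pvXO, List.foldl_cons]
    by_cases h : PySem.Int.mod p.2 2 = 1
    · simp only [if_pos h]
      rw [ih, ih, pv_bxor_zero_left, pv_bxor_assoc]
    · simp only [if_neg h]
      rw [ih, ih, pv_bxor_zero_left]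

theorem pvXO_cons (p : Int × Int) (l : List (Int × Int)) :
    pvXO (p :: l) = PySem.Int.bxor (if PySem.Int.mod p.2 2 = 1 then p.1 else 0) (pvXO l) := by
  have h0 : pvXO (p :: l)
      = l.foldl (fun o p => if PySem.Int.mod p.2 2 = 1 then PySem.Int.bxor o p.1 else o)
          (if PySem.Int.mod p.2 2 = 1 then PySem.Int.bxor 0 p.1 else 0) := by
    simp only [pvXO, List.foldl_cons]
  rw [h0, pvXO_acc]
  congr 1
  by_cases h : PySem.Int.mod p.2 2 = 1
  · rw [if_pos h, if_pos h, pv_bxor_zero_left]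
  · rw [if_neg h, if_neg h]

theorem pvXO_append_singleton (l : List (Int × Int)) (p : Int × Int) :
    pvXO (l ++ [p]) = if PySem.Int.mod p.2 2 = 1 then PySem.Int.bxor (pvXO l) p.1 else pvXO l := by
  simp only [pvXO, List.foldl_append, List.foldl_cons, List.foldl_nil]

-- A's pair fold computes (s + pvSY l, o ⊕ pvXO l)
theorem pv_pairfold (l : List (Int × Int)) (s o : Int) :
    l.foldl
      (fun (p : Int × Int) kv =>
        (p.1 + PySem.Int.mod kv.2 2,
         if PySem.Int.mod kv.2 2 = 1 then PySem.Int.bxor p.2 kv.1 else p.2))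
      (s, o)
      = (s + pvSY l, PySem.Int.bxor o (pvXO l)) := by
  induction l generalizing s o with
  | nil => simp only [List.foldl_nil, pvSY, pvXO, List.map_nil, List.sum_nil, add_zero]
           rw [PySem.Int.bxor_zero]
  | cons p l ih =>
    simp only [List.foldl_cons, ih, pvXO_cons, pvSY, List.map_cons, List.sum_cons, Prod.mk.injEq]
    constructor
    · ring
    · by_cases h : PySem.Int.mod p.2 2 = 1
      · rw [if_pos h, if_pos h, pv_bxor_assoc]
      · rw [if_neg h, if_neg h, pv_bxor_zero_left]

theorem pv_mod_two_succ (v : Int) : PySem.Int.mod (v + 1) 2 = 1 - PySem.Int.mod v 2 := by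
  rw [PySem.Int.mod_eq_emod_of_pos (a := v) (by norm_num),
      PySem.Int.mod_eq_emod_of_pos (a := v + 1) (by norm_num)]
  omega

theorem pv_parity_succ (a b : Int) (h : PySem.Int.mod a 2 = PySem.Int.mod b 2) :
    PySem.Int.mod (a + 1) 2 = PySem.Int.mod (b + 1) 2 := by
  simp only [PySem.Int.mod_eq_emod_of_pos (b := 2) (by norm_num : (0:Int) < 2)] at *
  omega

theorem pv_parity_toggle (a b m : Int) (h : PySem.Int.mod a 2 = PySem.Int.mod b 2) :
    PySem.Int.mod (a + 1 - 2 * m) 2 = PySem.Int.mod (b + 1) 2 := by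
  simp only [PySem.Int.mod_eq_emod_of_pos (b := 2) (by norm_num : (0:Int) < 2)] at *
  omega

-- toggling one key of a Nodup key list: parity of the sum flips, the xor toggles x
theorem pv_toggle (S : List Int) (c : Int → Int) (x : Int) (hx : x ∈ S) (hnd : S.Nodup) :
    pvSY (S.map (fun k => (k, if k = x then c k + 1 else c k)))
        = pvSY (S.map (fun k => (k, c k))) + 1 - 2 * PySem.Int.mod (c x) 2
  ∧ pvXO (S.map (fun k => (k, if k = x then c k + 1 else c k)))
        = PySem.Int.bxor (pvXO (S.map (fun k => (k, c k)))) x := by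
  induction S with
  | nil => cases hx
  | cons k S ih =>
    rcases List.nodup_cons.mp hnd with ⟨hk, hnd'⟩
    by_cases hkx : k = x
    · have hxnotS : x ∉ S := by rw [← hkx]; exact hk
      have hmapeq : S.map (fun k' => ((k', if k' = x then c k' + 1 else c k') : Int × Int))
          = S.map (fun k' => (k', c k')) := by
        apply List.map_congr_left
        intro a ha
        have hne : a ≠ x := fun h => hxnotS (h ▸ ha)
        simp only [if_neg hne]
      constructor
      · simp only [List.map_cons, pvSY, List.sum_cons, hmapeq, if_pos hkx]
        rw [pv_mod_two_succ, hkx]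
        ring
      · simp only [List.map_cons, pvXO_cons, hmapeq, if_pos hkx]
        rw [hkx]
        by_cases h : PySem.Int.mod (c x) 2 = 1
        · have h2 : PySem.Int.mod (c x + 1) 2 = 0 := by rw [pv_mod_two_succ, h]; ring
          rw [h2, h, if_neg (by norm_num : ¬ (0:Int) = 1), if_pos rfl]
          rw [pv_bxor_zero_left, PySem.Int.bxor_comm x _, pv_bxor_assoc,
              PySem.Int.bxor_self, PySem.Int.bxor_zero]
        · have h2 : PySem.Int.mod (c x + 1) 2 = 1 := by
            rw [pv_mod_two_succ]
            have h3 := PySem.Int.mod_nonneg (a := c x) (b := 2) (by norm_num)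
            have h4 := PySem.Int.mod_lt (a := c x) (b := 2) (by norm_num)
            omega
          rw [h2, if_pos rfl, if_neg h]
          rw [pv_bxor_zero_left, PySem.Int.bxor_comm]
    · have hxS : x ∈ S := by
        rcases List.mem_cons.mp hx with h | h
        · exact absurd h.symm hkx
        · exact h
      obtain ⟨ihS, ihX⟩ := ih hxS hnd'
      constructor
      · simp only [List.map_cons, pvSY, List.sum_cons, if_neg hkx] at *
        rw [ihS]; ring
      · simp only [List.map_cons, pvXO_cons, if_neg hkx]
        rw [ihX, pv_bxor_assoc]

-- ofList over an appended element
theorem pv_ofList_append (nums : List Int) (x : Int) :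
    PySem.Set.ofList (nums ++ [x])
      = if (PySem.Set.ofList nums).contains x then PySem.Set.ofList nums
        else PySem.Set.ofList nums ++ [x] := by
  simp only [PySem.Set.ofList, List.foldl_append, List.foldl_cons, List.foldl_nil, PySem.Set.add]

-- count of k in nums ++ [x], as an Int
theorem pv_count_append (nums : List Int) (x k : Int) :
    ((List.count k (nums ++ [x]) : Nat) : Int)
      = (List.count k nums : Int) + (if k = x then 1 else 0) := by
  rw [List.count_append]
  push_cast
  congr 1
  by_cases h : k = x
  · subst h; simp
  · have : ¬ (x == k) = true := by simp [Ne.symm h]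
    simp [List.count_singleton, this, h]

-- the main invariant, by reverse induction on nums
theorem pv_main (nums : List Int) :
    PySem.Int.mod (pvSY ((PySem.Dict.counter nums).items)) 2
        = PySem.Int.mod (nums.length : Int) 2
  ∧ pvXO ((PySem.Dict.counter nums).items) = nums.foldl PySem.Int.bxor 0 := by
  induction nums using List.reverseRecOn with
  | nil =>
    constructor <;> rfl
  | append_singleton nums x ih =>
    rw [PySem.Dict.items_counter] at *
    obtain ⟨ihS, ihX⟩ := ih
    have hlen : (((nums ++ [x]).length : Nat) : Int) = (nums.length : Int) + 1 := by
      simp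
    have hfold : (nums ++ [x]).foldl PySem.Int.bxor 0
        = PySem.Int.bxor (nums.foldl PySem.Int.bxor 0) x := by
      rw [List.foldl_append]; rfl
    by_cases hmem : x ∈ nums
    · have hxS : x ∈ PySem.Set.ofList nums := (PySem.Set.mem_ofList nums x).mpr hmem
      have hcont : (PySem.Set.ofList nums).contains x = true := List.elem_eq_true_of_mem hxS
      rw [pv_ofList_append, if_pos hcont]
      have hmap : (PySem.Set.ofList nums).map (fun k => ((k, (List.count k (nums ++ [x]) : Int)) : Int × Int))
          = (PySem.Set.ofList nums).map
              (fun k => (k, if k = x then (List.count k nums : Int) + 1 else (List.count k nums : Int))) := by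
        apply List.map_congr_left
        intro k _
        rw [pv_count_append]
        by_cases h : k = x
        · simp only [if_pos h]
        · simp only [if_neg h, add_zero]
      rw [hmap]
      obtain ⟨hT, hX⟩ := pv_toggle (PySem.Set.ofList nums)
        (fun k => (List.count k nums : Int)) x hxS (PySem.Set.nodup_ofList nums)
      constructor
      · rw [hT, hlen]
        exact pv_parity_toggle _ _ _ ihS
      · rw [hX, hfold, ihX]
    · have hxS : x ∉ PySem.Set.ofList nums := fun h => hmem ((PySem.Set.mem_ofList nums x).mp h)
      have hcont : ¬ (PySem.Set.ofList nums).contains x = true := by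
        intro h
        exact hxS (List.mem_of_elem_eq_true h)
      rw [pv_ofList_append, if_neg hcont, List.map_append]
      have hmap : (PySem.Set.ofList nums).map (fun k => ((k, (List.count k (nums ++ [x]) : Int)) : Int × Int))
          = (PySem.Set.ofList nums).map (fun k => (k, (List.count k nums : Int))) := by
        apply List.map_congr_left
        intro k hkS
        have hne : k ≠ x := fun h => hxS (h ▸ hkS)
        rw [pv_count_append, if_neg hne, add_zero]
      have hlast : [x].map (fun k => ((k, (List.count k (nums ++ [x]) : Int)) : Int × Int)) = [(x, 1)] := by
        simp only [List.map_cons, List.map_nil]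
        rw [pv_count_append, List.count_eq_zero_of_not_mem hmem, if_pos rfl]
        norm_num
      rw [hmap, hlast]
      constructor
      · have hS : pvSY ((PySem.Set.ofList nums).map (fun k => (k, (List.count k nums : Int))) ++ [((x : Int), (1 : Int))])
            = pvSY ((PySem.Set.ofList nums).map (fun k => (k, (List.count k nums : Int)))) + 1 := by
          simp only [pvSY, List.map_append, List.sum_append, List.map_cons, List.map_nil,
            List.sum_cons, List.sum_nil]
          have : PySem.Int.mod (1 : Int) 2 = 1 := rfl
          rw [this]
          ring
        rw [hS, hlen]
        exact pv_parity_succ _ _ ihS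
      · rw [pvXO_append_singleton]
        have h1 : PySem.Int.mod (1 : Int) 2 = 1 := rfl
        rw [h1, if_pos rfl, hfold, ihX]

-- ===== VERDICT (by name: the statement is the Claim_ definition above) =====
theorem xorGame_spec : Claim_equal_xorGame := by
  intro nums _
  obtain ⟨hS, hX⟩ := pv_main nums
  have hc : nums.foldl (fun d num => d.modify num 0 (· + 1)) PySem.Dict.empty
      = PySem.Dict.counter nums := (PySem.Dict.counter_eq_foldl nums).symm
  unfold Spec_xorGame xorGame xorGame_alt
  simp only [hc, pv_pairfold, zero_add, pv_bxor_zero_left, hS, hX]
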